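-- pv_equiv track=rewrite | github.com/beekkles/repaso-algo3 | codigo/10.py | PC
-- ===== SOURCE A (Python) =====
-- memo = {}
--
-- w = [19, 7, 5, 6, 1]
--
-- s = [15, 13, 7, 8, 2]
--
-- def PC(i,P):
--     if i >= len(w):
--         return 0
--     if (i,P) in memo:
--         return memo[(i,P)]
--
--     res = PC(i+1,P)
--
--     if P+w[i] <= s[i]:
--         res = max(res, 1 + PC(i+1, P + w[i]))
--
--     memo[(i,P)] = res
--
--     return res
-- ===== SOURCE B (Python) =====
-- w = [19, 7, 5, 6, 1]
--
-- s = [15, 13, 7, 8, 2]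
--
-- def PC(i, P):
--     # iterative forward enumeration of feasible prefixes: states = list of
--     # (accumulated weight, items taken) pairs, expanded level by level
--     states = [(P, 0)]
--     for j in range(i, len(w)):
--         states = states + [(wt + w[j], c + 1) for wt, c in states if wt + w[j] <= s[j]]
--     return max(c for _, c in states)
-- ===== Notes on version B (the rewrite author's own statement) =====
-- stated objective: alternative
-- what changed: Replaces the top-down memoized recursion over (i,P) with an iterative level-by-level expansion of (accumulated-weight, count) states followed by a max over the final counts.
import Mathlib
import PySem

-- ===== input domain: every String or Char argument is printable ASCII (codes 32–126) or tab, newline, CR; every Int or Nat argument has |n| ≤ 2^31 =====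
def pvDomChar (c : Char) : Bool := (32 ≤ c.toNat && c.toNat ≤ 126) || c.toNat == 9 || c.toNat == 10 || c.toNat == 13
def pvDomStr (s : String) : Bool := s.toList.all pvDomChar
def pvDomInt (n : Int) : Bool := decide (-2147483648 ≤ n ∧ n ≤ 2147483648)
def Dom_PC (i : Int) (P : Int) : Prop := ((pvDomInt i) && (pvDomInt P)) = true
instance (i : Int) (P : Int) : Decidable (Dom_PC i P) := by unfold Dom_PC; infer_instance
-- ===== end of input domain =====

-- B replaces A's memoized recursion with an iterative level-by-level expansion of
-- (weight, count) states; A's global memo is a pure cache and is dropped (return value only).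


-- ===== PORT A =====
def wL : List Int := [19, 7, 5, 6, 1]
def sL : List Int := [15, 13, 7, 8, 2]

-- literal port of A's recursion; the memo is a pure cache (the value depends only on (i,P))
-- and is dropped.  The fall-through match arm is Python's IndexError (i ≤ -6), outside Pre_PC.
def PC (i : Int) (P : Int) : Int :=
  if 5 ≤ i then 0
  else
    match PySem.List.pyGet? wL i, PySem.List.pyGet? sL i with
    | some wi, some si =>
      let res := PC (i + 1) P
      if P + wi ≤ si then max res (1 + PC (i + 1) (P + wi)) else res
    | _, _ => 0
termination_by (5 - i).toNat
decreasing_by all_goals omega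

-- ===== PORT B =====
-- one level of expansion: keep every state (skip item j) and append the feasible take states.
-- pyGetD is exact for -5 ≤ j < 5, the only indices reached under Pre_PC.
def stepB (states : List (Int × Int)) (j : Int) : List (Int × Int) :=
  states ++ (states.filter
      (fun p => p.1 + PySem.List.pyGetD wL j 0 ≤ PySem.List.pyGetD sL j 0)).map
      (fun p => (p.1 + PySem.List.pyGetD wL j 0, p.2 + 1))

def PC_alt (i : Int) (P : Int) : Int :=
  (PySem.List.max?
    (((PySem.List.pyRange i 5 1).foldl stepB [(P, 0)]).map (fun p => p.2))
    (fun c => c)).getD 0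

-- ===== PRECONDITION & SPEC =====
-- Pre_PC excludes exactly i ≤ -6, where Python's w[i] raises IndexError (in A and in B alike).
def Pre_PC (i : Int) (P : Int) : Prop := -5 ≤ i
instance (i : Int) (P : Int) : Decidable (Pre_PC i P) := by unfold Pre_PC; infer_instance
def pvWitness_PC : Int × Int := (0, 0)

def Spec_PC (i : Int) (P : Int) (out : Int) : Prop := out = PC_alt i P
instance (i : Int) (P : Int) (out : Int) : Decidable (Spec_PC i P out) := by unfold Spec_PC; infer_instance

-- ===== CLAIM (what is proved, stated in full; the proofs are below) =====
def Claim_equal_PC : Prop := ∀ (i : Int) (P : Int), Dom_PC i P → Pre_PC i P → Spec_PC i P (PC i P)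

-- ===== LEMMAS AND PROOFS =====

-- A's defining equation on in-range indices, with the list entries read through pyGetD
lemma PC_eq (j : Int) (h1 : -5 ≤ j) (h2 : j < 5) (wt : Int) :
    PC j wt =
      if wt + PySem.List.pyGetD wL j 0 ≤ PySem.List.pyGetD sL j 0 then
        max (PC (j + 1) wt) (1 + PC (j + 1) (wt + PySem.List.pyGetD wL j 0))
      else PC (j + 1) wt := by
  interval_cases j <;>
    (rw [PC.eq_def]; norm_num [wL, sL, PySem.List.pyGet?, PySem.List.pyGetD, PySem.List.pyIdx?])

lemma PC_nonneg (i P : Int) : 0 ≤ PC i P := by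
  fun_induction PC i P <;> simp_all <;> omega

-- the expanded state list always keeps its initial states as a prefix (the skip branch)
lemma foldl_stepB_prefix (r : List Int) (L : List (Int × Int)) :
    ∃ T, r.foldl stepB L = L ++ T := by
  induction r generalizing L with
  | nil => exact ⟨[], by simp⟩
  | cons j r ih =>
      obtain ⟨T, hT⟩ := ih (stepB L j)
      exact ⟨(L.filter (fun p => decide (p.1 + PySem.List.pyGetD wL j 0 ≤
          PySem.List.pyGetD sL j 0))).map
          (fun p => (p.1 + PySem.List.pyGetD wL j 0, p.2 + 1)) ++ T, by
        rw [List.foldl_cons, hT]; simp [stepB]⟩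

-- one expansion step is a flatMap, up to permutation
lemma stepB_perm (L : List (Int × Int)) (j : Int) :
    (stepB L j).Perm
      (L.flatMap (fun p =>
        if p.1 + PySem.List.pyGetD wL j 0 ≤ PySem.List.pyGetD sL j 0 then
          [p, (p.1 + PySem.List.pyGetD wL j 0, p.2 + 1)]
        else [p])) := by
  induction L with
  | nil => simp [stepB]
  | cons x L ih =>
      by_cases hx : x.1 + PySem.List.pyGetD wL j 0 ≤ PySem.List.pyGetD sL j 0
      · simp only [stepB, List.filter_cons, List.flatMap_cons, hx, decide_true, if_true,
          List.map_cons, List.cons_append] at *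
        refine List.Perm.cons x (List.Perm.trans List.perm_middle ?_)
        exact List.Perm.cons _ ih
      · simp only [stepB, List.filter_cons, List.flatMap_cons, hx, decide_false, if_false,
          List.cons_append] at *
        exact List.Perm.cons x ih

lemma foldl_flatMap' {α β γ : Type} (g : α → List γ) (f : β → γ → β)
    (L : List α) (a : β) :
    (L.flatMap g).foldl f a = L.foldl (fun acc x => (g x).foldl f acc) a := by
  induction L generalizing a with
  | nil => simp
  | cons x L ih => simp [List.flatMap_cons, List.foldl_append, ih]

-- main invariant: the running max of counts over the fully expanded states equals
-- the running max of (count + PC j weight) over the current states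
lemma invariant (n : Nat) : ∀ (j : Int), (5 - j).toNat = n → -5 ≤ j →
    ∀ (L : List (Int × Int)) (a : Int),
    ((PySem.List.pyRange j 5 1).foldl stepB L).foldl (fun acc p => max acc p.2) a
      = L.foldl (fun acc p => max acc (p.2 + PC j p.1)) a := by
  induction n with
  | zero =>
      intro j hn h1 L a
      have hj : (5:Int) ≤ j := by omega
      rw [PySem.List.pyRange_one_eq_nil hj, List.foldl_nil]
      apply PySem.List.foldl_congr_mem
      intro acc p hp
      rw [PC.eq_def, if_pos hj]
      simp
  | succ n ih =>
      intro j hn h1 L a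
      have hj : j < 5 := by omega
      rw [PySem.List.pyRange_one_cons hj, List.foldl_cons,
        ih (j + 1) (by omega) (by omega)]
      haveI : RightCommutative (fun (acc : Int) (p : Int × Int) =>
          max acc (p.2 + PC (j + 1) p.1)) := ⟨fun b x y => max_right_comm _ _ _⟩
      rw [(stepB_perm L j).foldl_eq]
      · rw [foldl_flatMap']
        apply PySem.List.foldl_congr_mem
        intro acc p hp
        rw [PC_eq j h1 hj p.1]
        by_cases hc : p.1 + PySem.List.pyGetD wL j 0 ≤ PySem.List.pyGetD sL j 0
        · rw [if_pos hc, if_pos hc]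
          simp only [List.foldl_cons, List.foldl_nil]
          rw [← max_add_add_left, ← max_assoc, add_assoc]
        · rw [if_neg hc, if_neg hc]
          simp

lemma PC_eq_alt (i P : Int) (hpre : -5 ≤ i) : PC i P = PC_alt i P := by
  unfold PC_alt
  obtain ⟨T, hT⟩ := foldl_stepB_prefix (PySem.List.pyRange i 5 1) [(P, 0)]
  have hinv := invariant (5 - i).toNat i rfl hpre [(P, 0)] 0
  rw [hT] at hinv ⊢
  simp only [List.cons_append, List.nil_append, List.map_cons, List.foldl_cons,
    List.foldl_nil] at hinv ⊢
  rw [PySem.List.max?_id_cons, Option.getD_some, List.foldl_map]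
  simp only [max_self, zero_add] at hinv
  rw [hinv, max_eq_right (PC_nonneg i P)]

-- ===== VERDICT (by name: the statement is the Claim_ definition above) =====
theorem PC_spec : Claim_equal_PC := by
  intro i P _ hpre
  exact PC_eq_alt i P hpre
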